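-- pv_equiv track=rewrite | github.com/Prajjwal98Dubey/DSA-Algorithms | Standard Algos/minimumoperationttoremovebothends.py | minimumOperationToRemoveBothEnds
-- ===== SOURCE A (Python) =====
-- def minimumOperationToRemoveBothEnds(s):
--     l,r = 0,len(s)-1
--     while l<r:
--         if s[l] == s[r]:
--             simi = s[l]
--             while s[l]==simi:
--                 if l+1<r:
--                     l+=1
--                 else:
--                     break
--             while s[r]==simi:
--                 if r+1>l:
--                     r-=1
--                 else:
--                     break
--         else:
--             break
--     return r-l+1
-- ===== SOURCE B (Python) =====
-- def minimumOperationToRemoveBothEnds(s):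
--     t = s
--     while len(t) >= 2 and t[0] == t[-1]:
--         t = t.strip(t[0])
--     return len(t)
-- ===== Notes on version B (the rewrite author's own statement) =====
-- stated objective: idiomatic
-- what changed: Replaces A's hand-rolled index juggling (two pointers over the string with nested run-skipping while-loops and wrap-around/cap edge cases) by the idiomatic loop 'while the two ends are the same character, strip that character from both ends with str.strip', returning the remaining length.
import Mathlib
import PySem

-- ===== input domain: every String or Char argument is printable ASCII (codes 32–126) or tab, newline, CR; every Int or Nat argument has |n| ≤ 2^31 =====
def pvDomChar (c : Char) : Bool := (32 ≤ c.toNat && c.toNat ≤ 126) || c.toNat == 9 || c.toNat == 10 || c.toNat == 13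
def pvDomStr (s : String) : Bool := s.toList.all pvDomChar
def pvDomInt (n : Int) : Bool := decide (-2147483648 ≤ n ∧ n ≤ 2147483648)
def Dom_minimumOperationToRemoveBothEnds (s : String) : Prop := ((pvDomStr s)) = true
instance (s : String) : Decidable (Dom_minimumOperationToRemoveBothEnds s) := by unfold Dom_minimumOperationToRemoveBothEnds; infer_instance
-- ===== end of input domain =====

-- B replaces A's hand-rolled index juggling (two pointers with nested run-skipping while-loops)
-- by the idiomatic loop "while the two ends match, strip that character from both ends" using
-- str.strip; objective: idiomatic/simpler, not claimed faster.

-- ===== PORT A =====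

-- total wrapper for Python's s[i]; on every index A's code actually reads (including the
-- s[-1] wraparound read in the inner right loop) the underlying pyGet? is `some`, so the
-- default is never the value A sees.
def pvGetC (cs : List Char) (i : Int) : Char := (PySem.List.pyGet? cs i).getD ' '

-- measure facts cited by name in the decreasing_by of the loops below
theorem pvDecLRun (l r : Int) (h : l + 1 < r) : (r - (l + 1)).toNat < (r - l).toNat := by
  omega

theorem pvDecRRun (l r : Int) (h : r + 1 > l) : (r - 1 + 1 - l).toNat < (r + 1 - l).toNat := by
  omega

-- inner loop `while s[l]==simi: if l+1<r: l+=1 else: break`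
def pvLRun (cs : List Char) (simi : Char) (r : Int) (l : Int) : Int :=
  if pvGetC cs l == simi then
    if l + 1 < r then pvLRun cs simi r (l + 1) else l
  else l
termination_by (r - l).toNat
decreasing_by rename_i _ h2; exact pvDecLRun l r h2

-- inner loop `while s[r]==simi: if r+1>l: r-=1 else: break`
def pvRRun (cs : List Char) (simi : Char) (l : Int) (r : Int) : Int :=
  if pvGetC cs r == simi then
    if r + 1 > l then pvRRun cs simi l (r - 1) else r
  else r
termination_by (r + 1 - l).toNat
decreasing_by rename_i _ h2; exact pvDecRRun l r h2

-- termination facts for the outer loop (cited by pvOuter's decreasing_by)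
theorem pvLRun_ge (cs : List Char) (simi : Char) (r : Int) :
    ∀ (n : Nat) (l : Int), (r - l).toNat ≤ n → l ≤ pvLRun cs simi r l := by
  intro n
  induction n with
  | zero =>
    intro l h
    rw [pvLRun]
    split_ifs with h1 h2
    · omega
    · omega
    · omega
  | succ n ih =>
    intro l h
    rw [pvLRun]
    split_ifs with h1 h2
    · have := ih (l + 1) (by omega); omega
    · omega
    · omega

theorem pvLRun_lt (cs : List Char) (simi : Char) (r : Int) :
    ∀ (n : Nat) (l : Int), (r - l).toNat ≤ n → l < r → pvLRun cs simi r l < r := by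
  intro n
  induction n with
  | zero =>
    intro l h hl
    rw [pvLRun]
    split_ifs with h1 h2
    · omega
    · omega
    · omega
  | succ n ih =>
    intro l h hl
    rw [pvLRun]
    split_ifs with h1 h2
    · exact ih (l + 1) (by omega) h2
    · omega
    · omega

theorem pvRRun_le (cs : List Char) (simi : Char) (l : Int) :
    ∀ (n : Nat) (r : Int), (r + 1 - l).toNat ≤ n → pvRRun cs simi l r ≤ r := by
  intro n
  induction n with
  | zero =>
    intro r h
    rw [pvRRun]
    split_ifs with h1 h2
    · omega
    · omega
    · omega
  | succ n ih =>
    intro r h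
    rw [pvRRun]
    split_ifs with h1 h2
    · have := ih (r - 1) (by omega); omega
    · omega
    · omega

-- measure fact for the outer loop (cited by name in its decreasing_by)
theorem pvDecOuter (cs : List Char) (l r : Int) (hlr : l < r)
    (hbeq : (pvGetC cs l == pvGetC cs r) = true) :
    (pvRRun cs (pvGetC cs l) (pvLRun cs (pvGetC cs l) r l) r
      - pvLRun cs (pvGetC cs l) r l).toNat < (r - l).toNat := by
  have hge : l ≤ pvLRun cs (pvGetC cs l) r l := pvLRun_ge _ _ _ (r - l).toNat l le_rfl
  have hlt : pvLRun cs (pvGetC cs l) r l < r := pvLRun_lt _ _ _ (r - l).toNat l le_rfl hlr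
  have hr1 : pvRRun cs (pvGetC cs l) (pvLRun cs (pvGetC cs l) r l) r ≤ r - 1 := by
    rw [pvRRun]
    have hc : (pvGetC cs r == pvGetC cs l) = true := by
      rw [beq_iff_eq] at hbeq ⊢
      exact hbeq.symm
    rw [if_pos hc, if_pos (by omega : r + 1 > pvLRun cs (pvGetC cs l) r l)]
    exact pvRRun_le cs (pvGetC cs l) (pvLRun cs (pvGetC cs l) r l)
      ((r - 1) + 1 - pvLRun cs (pvGetC cs l) r l).toNat (r - 1) le_rfl
  omega

-- outer loop `while l<r: if s[l]==s[r]: … else: break`; returns r-l+1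
def pvOuter (cs : List Char) (l : Int) (r : Int) : Int :=
  if l < r then
    if pvGetC cs l == pvGetC cs r then
      let simi := pvGetC cs l
      let l' := pvLRun cs simi r l
      let r' := pvRRun cs simi l' r
      pvOuter cs l' r'
    else r - l + 1
  else r - l + 1
termination_by (r - l).toNat
decreasing_by rename_i hlr hbeq; exact pvDecOuter cs l r hlr hbeq

def minimumOperationToRemoveBothEnds (s : String) : Int :=
  pvOuter s.toList 0 ((s.toList.length : Int) - 1)

-- ===== PORT B =====

-- length strictly drops when we strip the (matching) head character from both ends
theorem pvStripLen (p : Char → Bool) (xs : List Char) :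
    (List.dropWhile p (List.dropWhile p xs).reverse).reverse.length ≤ xs.length := by
  have h1 := List.length_dropWhile_le p xs
  have h2 := List.length_dropWhile_le p (List.dropWhile p xs).reverse
  simp only [List.length_reverse] at *
  omega

theorem pvStripChars_head_length_lt (a : Char) (ts : List Char) :
    (PySem.Chars.stripChars (a :: ts) [a]).length < (a :: ts).length := by
  unfold PySem.Chars.stripChars
  show (List.dropWhile (fun c => List.contains [a] c)
      (List.dropWhile (fun c => List.contains [a] c) (a :: ts)).reverse).reverse.length
      < (a :: ts).length
  have hstep : List.dropWhile (fun c => List.contains [a] c) (a :: ts)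
      = List.dropWhile (fun c => List.contains [a] c) ts := by
    rw [List.dropWhile_cons]
    simp
  rw [hstep]
  have := pvStripLen (fun c => List.contains [a] c) ts
  simp only [List.length_cons]
  omega

-- measure fact for the trim loop (cited by name in its decreasing_by)
theorem pvDecTrim (t : List Char) (h2 : 2 ≤ t.length) :
    (PySem.Chars.stripChars t [pvGetC t 0]).length < t.length := by
  match t, h2 with
  | a :: ts, _ =>
    have h : pvGetC (a :: ts) 0 = a := by
      simp [pvGetC, PySem.List.pyGet?, PySem.List.pyIdx?]
    rw [h]
    exact pvStripChars_head_length_lt a ts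

-- `while len(t) >= 2 and t[0] == t[-1]: t = t.strip(t[0])`, then `return len(t)`
def pvTrimLoop (t : List Char) : Int :=
  if 2 ≤ t.length then
    if pvGetC t 0 == pvGetC t (-1) then
      pvTrimLoop (PySem.Chars.stripChars t [pvGetC t 0])
    else (t.length : Int)
  else (t.length : Int)
termination_by t.length
decreasing_by rename_i h2 _; exact pvDecTrim t h2

def minimumOperationToRemoveBothEnds_alt (s : String) : Int := pvTrimLoop s.toList

-- ===== PRECONDITION & SPEC =====
def Spec_minimumOperationToRemoveBothEnds (s : String) (out : Int) : Prop := out = minimumOperationToRemoveBothEnds_alt s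
instance (s : String) (out : Int) : Decidable (Spec_minimumOperationToRemoveBothEnds s out) := by unfold Spec_minimumOperationToRemoveBothEnds; infer_instance

-- ===== CLAIM (what is proved, stated in full; the proofs are below) =====
def Claim_equal_minimumOperationToRemoveBothEnds : Prop := ∀ (s : String), Dom_minimumOperationToRemoveBothEnds s → Spec_minimumOperationToRemoveBothEnds s (minimumOperationToRemoveBothEnds s)

-- ===== LEMMAS AND PROOFS =====


-- the segment of cs at positions l..r (empty when r < l): what Python's two pointers look at
def pvSeg (cs : List Char) (l r : Int) : List Char := (cs.drop l.toNat).take (r + 1 - l).toNat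

-- the predicate str.strip([c]) drops by
def pvP (c : Char) : Char → Bool := fun x => List.contains [c] x

theorem pvGetC_nonneg (cs : List Char) (i : Int) (h0 : 0 ≤ i) :
    pvGetC cs i = (cs[i.toNat]?).getD ' ' := by
  have h : PySem.List.pyGet? cs i = cs[i.toNat]? := by
    rw [show i = ((i.toNat : Nat) : Int) from by omega, PySem.List.pyGet?_natCast,
      Int.toNat_natCast]
  rw [pvGetC, h]

theorem pvSeg_nil {cs : List Char} {l r : Int} (h : r < l) : pvSeg cs l r = [] := by
  unfold pvSeg
  have : (r + 1 - l).toNat = 0 := by omega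
  rw [this, List.take_zero]

theorem pvSeg_cons {cs : List Char} {l r : Int} (h0 : 0 ≤ l) (hlr : l ≤ r) (hr : r < cs.length) :
    pvSeg cs l r = pvGetC cs l :: pvSeg cs (l + 1) r := by
  unfold pvSeg
  have hl : l.toNat < cs.length := by omega
  rw [List.drop_eq_getElem_cons hl]
  have h1 : (r + 1 - l).toNat = (r + 1 - (l + 1)).toNat + 1 := by omega
  rw [h1, List.take_succ_cons]
  congr 1
  · rw [pvGetC_nonneg cs l h0, List.getElem?_eq_getElem hl]
    rfl
  · have h2 : (l + 1).toNat = l.toNat + 1 := by omega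
    rw [h2]

theorem pvSeg_length {cs : List Char} {l r : Int} (h0 : 0 ≤ l) (h1 : l - 1 ≤ r)
    (hr : r < cs.length) : (pvSeg cs l r).length = (r + 1 - l).toNat := by
  unfold pvSeg
  rw [List.length_take, List.length_drop]
  omega

theorem pvSeg_snoc {cs : List Char} {l r : Int} (h0 : 0 ≤ l) (hlr : l ≤ r) (hr : r < cs.length) :
    pvSeg cs l r = pvSeg cs l (r - 1) ++ [pvGetC cs r] := by
  unfold pvSeg
  have hk : (r + 1 - l).toNat = (r - l).toNat + 1 := by omega
  rw [hk, List.take_add_one]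
  congr 1
  · congr 1
    omega
  · rw [List.getElem?_drop]
    have h2 : l.toNat + (r - l).toNat = r.toNat := by omega
    have hrl : r.toNat < cs.length := by omega
    rw [h2, pvGetC_nonneg cs r (by omega), List.getElem?_eq_getElem hrl]
    rfl

theorem pvGetC_zero_cons (a : Char) (ts : List Char) : pvGetC (a :: ts) 0 = a := by
  simp [pvGetC, PySem.List.pyGet?, PySem.List.pyIdx?]

theorem pvGetC_neg_one_snoc (ys : List Char) (x : Char) : pvGetC (ys ++ [x]) (-1) = x := by
  simp [pvGetC, PySem.List.pyGet?, PySem.List.pyIdx?]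

theorem pvP_true {c x : Char} (h : x = c) : pvP c x = true := by
  simp [pvP, h]

theorem pvP_false {c x : Char} (h : x ≠ c) : pvP c x = false := by
  simp [pvP]
  exact fun he => (h he).elim

-- dropWhile eats exactly the leading run of c (m = first non-c position)
theorem pvDropLeft (cs : List Char) (c : Char) :
    ∀ (n : Nat) (l m r : Int), (m - l).toNat ≤ n → 0 ≤ l → l ≤ m → m ≤ r → r < cs.length →
    pvGetC cs m ≠ c → (∀ j, l ≤ j → j < m → pvGetC cs j = c) →
    List.dropWhile (pvP c) (pvSeg cs l r) = pvSeg cs m r := by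
  intro n
  induction n with
  | zero =>
    intro l m r hn h0 hlm hmr hr hm hall
    have he : l = m := by omega
    subst he
    rw [pvSeg_cons h0 (by omega) hr, List.dropWhile_cons, pvP_false hm,
      if_neg Bool.false_ne_true, ← pvSeg_cons h0 (by omega) hr]
  | succ n ih =>
    intro l m r hn h0 hlm hmr hr hm hall
    by_cases he : l = m
    · subst he
      rw [pvSeg_cons h0 (by omega) hr, List.dropWhile_cons, pvP_false hm,
        if_neg Bool.false_ne_true, ← pvSeg_cons h0 (by omega) hr]
    · rw [pvSeg_cons h0 (by omega) hr, List.dropWhile_cons,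
        pvP_true (hall l le_rfl (by omega)), if_pos rfl]
      exact ih (l + 1) m r (by omega) (by omega) (by omega) hmr hr hm
        (fun j hj1 hj2 => hall j (by omega) hj2)

-- with every position of l..r equal to c the whole segment is dropped
theorem pvDropAll (cs : List Char) (c : Char) :
    ∀ (n : Nat) (l r : Int), (r + 1 - l).toNat ≤ n → 0 ≤ l → r < cs.length →
    (∀ j, l ≤ j → j ≤ r → pvGetC cs j = c) →
    List.dropWhile (pvP c) (pvSeg cs l r) = [] := by
  intro n
  induction n with
  | zero =>
    intro l r hn h0 hr hall
    rw [pvSeg_nil (by omega), List.dropWhile_nil]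
  | succ n ih =>
    intro l r hn h0 hr hall
    by_cases hrl : r < l
    · rw [pvSeg_nil hrl, List.dropWhile_nil]
    · rw [pvSeg_cons h0 (by omega) hr, List.dropWhile_cons,
        pvP_true (hall l le_rfl (by omega)), if_pos rfl]
      exact ih (l + 1) r (by omega) (by omega) hr (fun j hj1 hj2 => hall j (by omega) hj2)

-- from the right: dropWhile on the reversed segment eats the trailing run of c
theorem pvDropRight (cs : List Char) (c : Char) :
    ∀ (n : Nat) (l m' r : Int), (r - m').toNat ≤ n → 0 ≤ l → l ≤ m' → m' ≤ r → r < cs.length →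
    pvGetC cs m' ≠ c → (∀ j, m' < j → j ≤ r → pvGetC cs j = c) →
    List.dropWhile (pvP c) (pvSeg cs l r).reverse = (pvSeg cs l m').reverse := by
  intro n
  induction n with
  | zero =>
    intro l m' r hn h0 hlm hmr hr hm hall
    have he : r = m' := by omega
    subst he
    have hseg : (pvSeg cs l r).reverse = pvGetC cs r :: (pvSeg cs l (r - 1)).reverse := by
      rw [pvSeg_snoc h0 (by omega) hr]
      simp
    rw [hseg, List.dropWhile_cons, pvP_false hm, if_neg Bool.false_ne_true, ← hseg]
  | succ n ih =>
    intro l m' r hn h0 hlm hmr hr hm hall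
    by_cases he : r = m'
    · subst he
      have hseg : (pvSeg cs l r).reverse = pvGetC cs r :: (pvSeg cs l (r - 1)).reverse := by
        rw [pvSeg_snoc h0 (by omega) hr]
        simp
      rw [hseg, List.dropWhile_cons, pvP_false hm, if_neg Bool.false_ne_true, ← hseg]
    · have hseg : (pvSeg cs l r).reverse = pvGetC cs r :: (pvSeg cs l (r - 1)).reverse := by
        rw [pvSeg_snoc h0 (by omega) hr]
        simp
      rw [hseg, List.dropWhile_cons, pvP_true (hall r (by omega) le_rfl), if_pos rfl]
      exact ih l m' (r - 1) (by omega) h0 hlm (by omega) (by omega) hm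
        (fun j hj1 hj2 => hall j hj1 (by omega))

-- str.strip(c) on the segment l..r = the segment m..m' (first/last non-c positions)
theorem pvStripSeg (cs : List Char) (c : Char) (l m m' r : Int) (h0 : 0 ≤ l) (hlm : l ≤ m)
    (hmm' : m ≤ m') (hm'r : m' ≤ r) (hr : r < cs.length)
    (hm : pvGetC cs m ≠ c) (hm' : pvGetC cs m' ≠ c)
    (hallL : ∀ j, l ≤ j → j < m → pvGetC cs j = c)
    (hallR : ∀ j, m' < j → j ≤ r → pvGetC cs j = c) :
    PySem.Chars.stripChars (pvSeg cs l r) [c] = pvSeg cs m m' := by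
  unfold PySem.Chars.stripChars
  show (List.dropWhile (pvP c) (List.dropWhile (pvP c) (pvSeg cs l r)).reverse).reverse
      = pvSeg cs m m'
  rw [pvDropLeft cs c (m - l).toNat l m r le_rfl h0 hlm (by omega) hr hm hallL]
  rw [pvDropRight cs c (r - m').toNat m m' r le_rfl (by omega) hmm' hm'r hr hm' hallR]
  exact List.reverse_reverse _

-- str.strip(c) on an all-c segment is empty
theorem pvStripSegAll (cs : List Char) (c : Char) (l r : Int) (h0 : 0 ≤ l) (hr : r < cs.length)
    (hall : ∀ j, l ≤ j → j ≤ r → pvGetC cs j = c) :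
    PySem.Chars.stripChars (pvSeg cs l r) [c] = [] := by
  unfold PySem.Chars.stripChars
  show (List.dropWhile (pvP c) (List.dropWhile (pvP c) (pvSeg cs l r)).reverse).reverse = []
  rw [pvDropAll cs c (r + 1 - l).toNat l r le_rfl h0 hr hall]
  simp

-- A's left inner loop on an all-c stretch stops at the cap r-1
theorem pvLRun_all (cs : List Char) (c : Char) (r : Int) :
    ∀ (n : Nat) (l : Int), (r - 1 - l).toNat ≤ n → l ≤ r - 1 →
    (∀ j, l ≤ j → j < r → pvGetC cs j = c) → pvLRun cs c r l = r - 1 := by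
  intro n
  induction n with
  | zero =>
    intro l hn hle hall
    have he : l = r - 1 := by omega
    subst he
    rw [pvLRun, if_pos (beq_iff_eq.mpr (hall _ le_rfl (by omega))), if_neg (by omega)]
  | succ n ih =>
    intro l hn hle hall
    by_cases he : l = r - 1
    · subst he
      rw [pvLRun, if_pos (beq_iff_eq.mpr (hall _ le_rfl (by omega))), if_neg (by omega)]
    · rw [pvLRun, if_pos (beq_iff_eq.mpr (hall _ le_rfl (by omega))), if_pos (by omega)]
      exact ih (l + 1) (by omega) (by omega) (fun j hj1 hj2 => hall j (by omega) hj2)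

-- A's left inner loop stops at the first non-c position m (when m < r)
theorem pvLRun_find (cs : List Char) (c : Char) (r : Int) :
    ∀ (n : Nat) (l m : Int), (m - l).toNat ≤ n → l ≤ m → m < r → pvGetC cs m ≠ c →
    (∀ j, l ≤ j → j < m → pvGetC cs j = c) → pvLRun cs c r l = m := by
  intro n
  induction n with
  | zero =>
    intro l m hn hlm hmr hm hall
    have he : l = m := by omega
    subst he
    rw [pvLRun, if_neg (by simpa using hm)]
  | succ n ih =>
    intro l m hn hlm hmr hm hall
    by_cases he : l = m
    · subst he
      rw [pvLRun, if_neg (by simpa using hm)]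
    · rw [pvLRun, if_pos (beq_iff_eq.mpr (hall _ le_rfl (by omega))), if_pos (by omega)]
      exact ih (l + 1) m (by omega) (by omega) hmr hm
        (fun j hj1 hj2 => hall j (by omega) hj2)

-- A's right inner loop on an all-c stretch stops at the floor l-1
theorem pvRRun_all (cs : List Char) (c : Char) (l : Int) :
    ∀ (n : Nat) (r : Int), (r + 1 - l).toNat ≤ n → l - 1 ≤ r →
    (∀ j, l ≤ j → j ≤ r → pvGetC cs j = c) → pvRRun cs c l r = l - 1 := by
  intro n
  induction n with
  | zero =>
    intro r hn hle hall
    rw [pvRRun]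
    split_ifs with h1 h2
    · omega
    · omega
    · omega
  | succ n ih =>
    intro r hn hle hall
    by_cases he : r = l - 1
    · rw [pvRRun]
      split_ifs with h1 h2
      · omega
      · omega
      · omega
    · rw [pvRRun, if_pos (beq_iff_eq.mpr (hall r (by omega) le_rfl)), if_pos (by omega)]
      exact ih (r - 1) (by omega) (by omega) (fun j hj1 hj2 => hall j hj1 (by omega))

-- A's right inner loop stops at the last non-c position m' (when l ≤ m')
theorem pvRRun_find (cs : List Char) (c : Char) (l : Int) :
    ∀ (n : Nat) (r m' : Int), (r - m').toNat ≤ n → l ≤ m' → m' ≤ r → pvGetC cs m' ≠ c →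
    (∀ j, m' < j → j ≤ r → pvGetC cs j = c) → pvRRun cs c l r = m' := by
  intro n
  induction n with
  | zero =>
    intro r m' hn hlm hmr hm hall
    have he : r = m' := by omega
    subst he
    rw [pvRRun, if_neg (by simpa using hm)]
  | succ n ih =>
    intro r m' hn hlm hmr hm hall
    by_cases he : r = m'
    · subst he
      rw [pvRRun, if_neg (by simpa using hm)]
    · rw [pvRRun, if_pos (beq_iff_eq.mpr (hall r (by omega) le_rfl)), if_pos (by omega)]
      exact ih (r - 1) m' (by omega) hlm (by omega) hm
        (fun j hj1 hj2 => hall j hj1 (by omega))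

-- one step / stop equations for B's loop
theorem pvTrim_step (t : List Char) (h2 : 2 ≤ t.length) (heq : pvGetC t 0 = pvGetC t (-1)) :
    pvTrimLoop t = pvTrimLoop (PySem.Chars.stripChars t [pvGetC t 0]) := by
  conv_lhs => rw [pvTrimLoop]
  rw [if_pos h2, if_pos (beq_iff_eq.mpr heq)]

theorem pvTrim_small (t : List Char) (h : ¬ 2 ≤ t.length) : pvTrimLoop t = (t.length : Int) := by
  rw [pvTrimLoop, if_neg h]

theorem pvTrim_ne (t : List Char) (h2 : 2 ≤ t.length) (hne : pvGetC t 0 ≠ pvGetC t (-1)) :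
    pvTrimLoop t = (t.length : Int) := by
  rw [pvTrimLoop, if_pos h2, if_neg (by simpa using hne)]

-- ends of a 2+ segment
theorem pvSeg_get0 {cs : List Char} {l r : Int} (h0 : 0 ≤ l) (hlr : l ≤ r) (hr : r < cs.length) :
    pvGetC (pvSeg cs l r) 0 = pvGetC cs l := by
  rw [pvSeg_cons h0 hlr hr, pvGetC_zero_cons]

theorem pvSeg_getneg1 {cs : List Char} {l r : Int} (h0 : 0 ≤ l) (hlr : l ≤ r)
    (hr : r < cs.length) : pvGetC (pvSeg cs l r) (-1) = pvGetC cs r := by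
  rw [pvSeg_snoc h0 hlr hr, pvGetC_neg_one_snoc]

-- first non-c position at or after l (given some non-c position exists in l..r)
theorem pvFirstNonC (cs : List Char) (c : Char) (l r j0 : Int) (h0 : l ≤ j0) (hj : j0 ≤ r)
    (hc : pvGetC cs j0 ≠ c) :
    ∃ m : Int, l ≤ m ∧ m ≤ r ∧ pvGetC cs m ≠ c ∧ ∀ j, l ≤ j → j < m → pvGetC cs j = c := by
  have hex : ∃ k : Nat, l + (k : Int) ≤ r ∧ pvGetC cs (l + (k : Int)) ≠ c := by
    refine ⟨(j0 - l).toNat, by omega, ?_⟩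
    rw [show l + (((j0 - l).toNat : Nat) : Int) = j0 from by omega]
    exact hc
  have hspec := Nat.find_spec hex
  refine ⟨l + ((Nat.find hex : Nat) : Int), by omega, hspec.1, hspec.2, ?_⟩
  intro j hj1 hj2
  by_contra hne
  have hk : (j - l).toNat < Nat.find hex := by omega
  refine Nat.find_min hex hk ⟨by omega, ?_⟩
  rw [show l + (((j - l).toNat : Nat) : Int) = j from by omega]
  exact hne

-- last non-c position at or before r
theorem pvLastNonC (cs : List Char) (c : Char) (l r j0 : Int) (h0 : l ≤ j0) (hj : j0 ≤ r)
    (hc : pvGetC cs j0 ≠ c) :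
    ∃ m' : Int, l ≤ m' ∧ m' ≤ r ∧ pvGetC cs m' ≠ c ∧ ∀ j, m' < j → j ≤ r → pvGetC cs j = c := by
  have hex : ∃ k : Nat, l ≤ r - (k : Int) ∧ pvGetC cs (r - (k : Int)) ≠ c := by
    refine ⟨(r - j0).toNat, by omega, ?_⟩
    rw [show r - (((r - j0).toNat : Nat) : Int) = j0 from by omega]
    exact hc
  have hspec := Nat.find_spec hex
  refine ⟨r - ((Nat.find hex : Nat) : Int), hspec.1, by omega, hspec.2, ?_⟩
  intro j hj1 hj2
  by_contra hne
  have hk : (r - j).toNat < Nat.find hex := by omega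
  refine Nat.find_min hex hk ⟨by omega, ?_⟩
  rw [show r - (((r - j).toNat : Nat) : Int) = j from by omega]
  exact hne

-- the window is degenerate (r ≤ l): both sides are max (r - l + 1) 0 written out
theorem pvBase (cs : List Char) (l r : Int) (h0 : 0 ≤ l) (h1 : l - 1 ≤ r) (hr : r < cs.length)
    (hnl : ¬ l < r) : pvOuter cs l r = pvTrimLoop (pvSeg cs l r) := by
  rw [pvOuter, if_neg hnl]
  by_cases hrl : r < l
  · rw [pvSeg_nil hrl, pvTrim_small _ (by simp)]
    simp only [List.length_nil, Nat.cast_zero]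
    omega
  · have hre : r = l := by omega
    subst hre
    rw [pvSeg_cons h0 le_rfl hr, pvSeg_nil (by omega), pvTrim_small _ (by simp)]
    simp

-- THE INVARIANT: A's outer loop on window l..r computes B's trim loop on the segment l..r
theorem pvMainAux : ∀ (n : Nat) (cs : List Char) (l r : Int), (r - l).toNat ≤ n → 0 ≤ l →
    l - 1 ≤ r → r < cs.length → pvOuter cs l r = pvTrimLoop (pvSeg cs l r) := by
  intro n
  induction n with
  | zero =>
    intro cs l r hn h0 h1 hr
    exact pvBase cs l r h0 h1 hr (by omega)
  | succ n ih =>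
    intro cs l r hn h0 h1 hr
    by_cases hlr : l < r
    · have hlen : (pvSeg cs l r).length = (r + 1 - l).toNat := pvSeg_length h0 h1 hr
      by_cases hbeq : pvGetC cs l = pvGetC cs r
      · -- ends match: A strips both runs with its inner loops, B strips with str.strip
        rw [pvOuter, if_pos hlr, if_pos (by simpa using hbeq)]
        show pvOuter cs (pvLRun cs (pvGetC cs l) r l)
            (pvRRun cs (pvGetC cs l) (pvLRun cs (pvGetC cs l) r l) r)
          = pvTrimLoop (pvSeg cs l r)
        have h2len : 2 ≤ (pvSeg cs l r).length := by rw [hlen]; omega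
        have hends : pvGetC (pvSeg cs l r) 0 = pvGetC (pvSeg cs l r) (-1) := by
          rw [pvSeg_get0 h0 (le_of_lt hlr) hr, pvSeg_getneg1 h0 (le_of_lt hlr) hr]
          exact hbeq
        rw [pvTrim_step _ h2len hends, pvSeg_get0 h0 (le_of_lt hlr) hr]
        by_cases hall : ∀ j, l ≤ j → j ≤ r → pvGetC cs j = pvGetC cs l
        · -- the whole window is one character: both collapse to the empty remainder
          rw [pvLRun_all cs (pvGetC cs l) r (r - 1 - l).toNat l le_rfl (by omega)
            (fun j hj1 hj2 => hall j hj1 (by omega))]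
          rw [pvRRun_all cs (pvGetC cs l) (r - 1) (r + 1 - (r - 1)).toNat r le_rfl (by omega)
            (fun j hj1 hj2 => hall j (by omega) hj2)]
          rw [pvStripSegAll cs (pvGetC cs l) l r h0 hr hall]
          rw [pvOuter, if_neg (by omega), pvTrim_small _ (by simp)]
          simp
        · -- there is a non-c position: both sides shrink to the window m..m'
          push Not at hall
          obtain ⟨j0, hj0l, hj0r, hj0c⟩ := hall
          obtain ⟨m, hlm, hmr, hmc, hmL⟩ :=
            pvFirstNonC cs (pvGetC cs l) l r j0 hj0l hj0r hj0c
          obtain ⟨m', hlm', hm'r, hm'c, hmR⟩ :=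
            pvLastNonC cs (pvGetC cs l) l r j0 hj0l hj0r hj0c
          have hmm' : m ≤ m' := by
            by_contra h
            exact hmc (hmR m (by omega) hmr)
          have hlm2 : l < m := by
            rcases eq_or_lt_of_le hlm with h | h
            · exact absurd (by rw [← h]) hmc
            · exact h
          have hm'2 : m' < r := by
            rcases eq_or_lt_of_le hm'r with h | h
            · exact absurd (by rw [h]; exact hbeq.symm) hm'c
            · exact h
          rw [pvLRun_find cs (pvGetC cs l) r (m - l).toNat l m le_rfl hlm (by omega) hmc hmL]
          rw [pvRRun_find cs (pvGetC cs l) m (r - m').toNat r m' le_rfl hmm' hm'r hm'c hmR]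
          rw [pvStripSeg cs (pvGetC cs l) l m m' r h0 hlm hmm' hm'r hr hmc hm'c hmL hmR]
          exact ih cs m m' (by omega) (by omega) (by omega) (by omega)
      · -- ends differ: both return the window length
        rw [pvOuter, if_pos hlr, if_neg (by simpa using hbeq)]
        rw [pvTrim_ne _ (by rw [hlen]; omega)
          (by rw [pvSeg_get0 h0 (le_of_lt hlr) hr, pvSeg_getneg1 h0 (le_of_lt hlr) hr]
              exact hbeq)]
        rw [hlen]
        omega
    · exact pvBase cs l r h0 h1 hr hlr


-- ===== VERDICT (by name: the statement is the Claim_ definition above) =====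
theorem minimumOperationToRemoveBothEnds_spec : Claim_equal_minimumOperationToRemoveBothEnds := by
  intro s _
  unfold Spec_minimumOperationToRemoveBothEnds
  unfold minimumOperationToRemoveBothEnds minimumOperationToRemoveBothEnds_alt
  have hseg : pvSeg s.toList 0 ((s.toList.length : Int) - 1) = s.toList := by
    unfold pvSeg
    have h1 : ((0 : Int)).toNat = 0 := rfl
    have h2 : (((s.toList.length : Int) - 1) + 1 - 0).toNat = s.toList.length := by omega
    rw [h1, h2, List.drop_zero, List.take_length]
  have := pvMainAux ((s.toList.length : Int) - 1).toNat s.toList 0 ((s.toList.length : Int) - 1)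
    (by omega) (by omega) (by omega) (by omega)
  rw [this, hseg]
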